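-- pv_equiv track=rewrite | github.com/Tiddles76/Hello | GEXP_List/gexp_puller.py | _find_member_indices_by_name
-- ===== SOURCE A (Python) =====
-- from typing import Dict, List, Any, Optional, Tuple
--
-- def _find_member_indices_by_name(members: List[Dict[str, Any]], query: str) -> List[int]:
--     q = (query or "").strip().lower()
--     if not q:
--         return []
--
--     exact = [i for i, m in enumerate(members) if str(m.get("ign", "")).strip().lower() == q]
--     if exact:
--         return exact
--
--     contains = [i for i, m in enumerate(members) if q in str(m.get("ign", "")).strip().lower()]
--     return contains
-- ===== SOURCE B (Python) =====
-- def _find_member_indices_by_name(members, query):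
--     q = (query or "").strip().lower()
--     if not q:
--         return []
--     exact = []
--     contains = []
--     for i, m in enumerate(members):
--         name = str(m.get("ign", "")).strip().lower()
--         if name == q:
--             exact.append(i)
--         if q in name:
--             contains.append(i)
--     return exact if exact else contains
-- ===== Notes on version B (the rewrite author's own statement) =====
-- stated objective: alternative
-- what changed: Replaces A's two independent enumerate-scans (exact pass, then a second contains pass) with a single loop that normalizes each name once and maintains both accumulators in one traversal.
import Mathlib
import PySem

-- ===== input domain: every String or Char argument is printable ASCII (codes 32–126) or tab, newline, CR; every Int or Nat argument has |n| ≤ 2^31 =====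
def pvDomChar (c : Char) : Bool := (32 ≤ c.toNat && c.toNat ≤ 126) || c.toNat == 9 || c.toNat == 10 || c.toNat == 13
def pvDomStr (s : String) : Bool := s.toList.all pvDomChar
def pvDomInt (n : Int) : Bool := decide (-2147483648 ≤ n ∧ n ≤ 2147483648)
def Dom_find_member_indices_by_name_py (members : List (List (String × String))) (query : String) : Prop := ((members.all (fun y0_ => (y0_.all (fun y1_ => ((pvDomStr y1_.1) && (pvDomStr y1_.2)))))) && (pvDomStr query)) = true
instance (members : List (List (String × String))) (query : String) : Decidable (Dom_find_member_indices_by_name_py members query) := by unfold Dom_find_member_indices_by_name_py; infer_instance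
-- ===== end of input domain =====

-- B performs one traversal with two accumulators, normalizing each name once,
-- instead of A's two independent comprehension scans (objective: alternative).

-- shared helper: str(m.get("ign","")).strip().lower() (dict = assoc list, first match)
def pvNormIgn (m : List (String × String)) : String :=
  PySem.Str.lower (PySem.Str.strip (match m.find? (fun p => p.1 == "ign") with
    | some p => p.2
    | none => ""))

-- ===== PORT A =====
def find_member_indices_by_name_py (members : List (List (String × String))) (query : String) : List Int :=
  let q := PySem.Str.lower (PySem.Str.strip query)
  if q = "" then []
  else
    let exact := ((PySem.List.enumerate members).filter (fun p => pvNormIgn p.2 == q)).map (·.1)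
    if exact ≠ [] then exact
    else ((PySem.List.enumerate members).filter (fun p => PySem.Str.isIn q (pvNormIgn p.2))).map (·.1)

-- ===== PORT B =====
def find_member_indices_by_name_py_alt (members : List (List (String × String))) (query : String) : List Int :=
  let q := PySem.Str.lower (PySem.Str.strip query)
  if q = "" then []
  else
    let acc := (PySem.List.enumerate members).foldl
      (fun acc p =>
        let name := pvNormIgn p.2
        (if name == q then acc.1 ++ [p.1] else acc.1,
         if PySem.Str.isIn q name then acc.2 ++ [p.1] else acc.2))
      ([], [])
    if acc.1 ≠ [] then acc.1 else acc.2

-- ===== PRECONDITION & SPEC =====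
def Spec_find_member_indices_by_name_py (members : List (List (String × String))) (query : String) (out : List Int) : Prop := out = find_member_indices_by_name_py_alt members query
instance (members : List (List (String × String))) (query : String) (out : List Int) : Decidable (Spec_find_member_indices_by_name_py members query out) := by unfold Spec_find_member_indices_by_name_py; infer_instance

-- ===== CLAIM (what is proved, stated in full; the proofs are below) =====
def Claim_equal_find_member_indices_by_name_py : Prop := ∀ (members : List (List (String × String))) (query : String), Dom_find_member_indices_by_name_py members query → Spec_find_member_indices_by_name_py members query (find_member_indices_by_name_py members query)

-- ===== LEMMAS AND PROOFS =====

-- B's single fold with two accumulators equals A's two filtered scans.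
theorem pvFoldPair (q : String) (l : List (Int × List (String × String))) (e c : List Int) :
    l.foldl
      (fun acc p =>
        let name := pvNormIgn p.2
        (if name == q then acc.1 ++ [p.1] else acc.1,
         if PySem.Str.isIn q name then acc.2 ++ [p.1] else acc.2))
      (e, c)
    = (e ++ (l.filter (fun p => pvNormIgn p.2 == q)).map (·.1),
       c ++ (l.filter (fun p => PySem.Str.isIn q (pvNormIgn p.2))).map (·.1)) := by
  induction l generalizing e c with
  | nil => simp
  | cons hd tl ih =>
    simp only [List.foldl_cons, List.filter_cons]
    rw [ih]
    split_ifs <;> simp_all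

-- ===== VERDICT (by name: the statement is the Claim_ definition above) =====
theorem find_member_indices_by_name_py_spec : Claim_equal_find_member_indices_by_name_py := by
  intro members query _
  unfold Spec_find_member_indices_by_name_py find_member_indices_by_name_py find_member_indices_by_name_py_alt
  by_cases hq : PySem.Str.lower (PySem.Str.strip query) = ""
  · simp [hq]
  · simp only [hq, if_false, pvFoldPair, List.nil_append]
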